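-- pv_equiv track=rewrite | github.com/LilaKen/TAKNI | benchmark_tam_factor_sensitivity.py | pooled_lengths
-- ===== SOURCE A (Python) =====
-- import math
-- from typing import Dict, Iterable, List, Optional, Sequence, Tuple
--
-- def pooled_lengths(length: int, e_layers: int, distil: bool = True) -> List[int]:
--     lengths = []
--     current = length
--     for layer_idx in range(e_layers):
--         lengths.append(current)
--         if distil and layer_idx < e_layers - 1:
--             # MaxPool1d(kernel_size=3, stride=2, padding=1) gives ceil(L / 2).
--             current = math.ceil(current / 2)
--     return lengths
-- ===== SOURCE B (Python) =====
-- def pooled_lengths(length: int, e_layers: int, distil: bool = True):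
--     # Closed form: repeated ceiling-halving i times equals one ceil-division by 2**i,
--     # computed as an arithmetic right shift: ceil(x / 2**i) == -((-x) >> i).
--     if not distil:
--         return [length] * e_layers
--     return [-((-length) >> i) for i in range(e_layers)]
-- ===== Notes on version B (the rewrite author's own statement) =====
-- stated objective: simpler
-- what changed: Replaces the incremental accumulator loop (append current, then ceiling-halve it) with a direct closed form: [length]*e_layers when not distil, else a per-index integer ceil-division [ceil(length/2**i) for i in range(e_layers)], using the identity that i repeated ceiling-halvings equal one ceil-division by 2**i.
import Mathlib
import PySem

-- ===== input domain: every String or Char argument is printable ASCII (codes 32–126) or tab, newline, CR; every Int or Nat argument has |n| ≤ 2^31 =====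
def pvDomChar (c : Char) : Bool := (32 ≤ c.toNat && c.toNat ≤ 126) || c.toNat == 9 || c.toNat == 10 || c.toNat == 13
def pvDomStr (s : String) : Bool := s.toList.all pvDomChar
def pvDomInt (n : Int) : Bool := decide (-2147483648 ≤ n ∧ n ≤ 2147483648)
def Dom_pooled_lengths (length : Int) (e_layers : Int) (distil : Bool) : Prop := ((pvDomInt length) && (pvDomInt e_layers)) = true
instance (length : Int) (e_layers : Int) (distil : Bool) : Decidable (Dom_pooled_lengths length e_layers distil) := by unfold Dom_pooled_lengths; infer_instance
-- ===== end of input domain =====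

-- B replaces A's accumulator loop by a closed-form per-index ceil-division; objective: simpler.

-- ===== PORT A =====
-- the loop 'for layer_idx in range(e_layers)' with state (lengths, current);
-- math.ceil(current / 2) is ported as floordiv (current + 1) 2, exact on Dom (|length| ≤ 2^31 < 2^53)
def pooled_lengths_loopA (e_layers : Int) (distil : Bool) :
    Nat → Int → List Int → Int → List Int
  | 0, _, lengths, _ => lengths
  | n+1, layer_idx, lengths, current =>
      let lengths := lengths ++ [current]
      let current := if distil && decide (layer_idx < e_layers - 1)
                     then PySem.Int.floordiv (current + 1) 2 else current
      pooled_lengths_loopA e_layers distil n (layer_idx + 1) lengths current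

def pooled_lengths (length : Int) (e_layers : Int) (distil : Bool) : List Int :=
  pooled_lengths_loopA e_layers distil e_layers.toNat 0 [] length

-- ===== PORT B =====
-- Python's arithmetic right shift '(-length) >> i' is floor((-length) / 2^i); ported exactly as floordiv (-length) (2^i)
def pooled_lengths_alt (length : Int) (e_layers : Int) (distil : Bool) : List Int :=
  if !distil then List.replicate e_layers.toNat length
  else (List.range e_layers.toNat).map (fun i => -(PySem.Int.floordiv (-length) ((2:Int)^i)))

-- ===== PRECONDITION & SPEC =====
def Spec_pooled_lengths (length : Int) (e_layers : Int) (distil : Bool) (out : List Int) : Prop := out = pooled_lengths_alt length e_layers distil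
instance (length : Int) (e_layers : Int) (distil : Bool) (out : List Int) : Decidable (Spec_pooled_lengths length e_layers distil out) := by unfold Spec_pooled_lengths; infer_instance

-- ===== CLAIM (what is proved, stated in full; the proofs are below) =====
def Claim_equal_pooled_lengths : Prop := ∀ (length : Int) (e_layers : Int) (distil : Bool), Dom_pooled_lengths length e_layers distil → Spec_pooled_lengths length e_layers distil (pooled_lengths length e_layers distil)

-- ===== LEMMAS AND PROOFS =====

-- ceil(c/2) written as floor((c+1)/2) equals -floor((-c)/2)
theorem pv_ceil_half (c : Int) :
    PySem.Int.floordiv (c + 1) 2 = -(PySem.Int.floordiv (-c) 2) := by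
  simp only [PySem.Int.floordiv_eq_ediv_of_pos (show (0:Int) < 2 by omega)]
  omega

-- one ceiling-halving step on the i-th closed-form value gives the (i+1)-st
theorem pv_shift (cur : Int) (i : Nat) :
    -(PySem.Int.floordiv (-(PySem.Int.floordiv (cur + 1) 2)) ((2:Int)^i))
      = -(PySem.Int.floordiv (-cur) ((2:Int)^(i+1))) := by
  rw [pv_ceil_half, neg_neg]
  simp only [PySem.Int.floordiv_eq_ediv_of_pos (show (0:Int) < 2 by omega),
    PySem.Int.floordiv_eq_ediv_of_pos (show (0:Int) < (2:Int)^i by positivity),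
    PySem.Int.floordiv_eq_ediv_of_pos (show (0:Int) < (2:Int)^(i+1) by positivity)]
  rw [Int.ediv_ediv_of_nonneg (show (0:Int) ≤ 2 by omega)]
  congr 2
  ring

-- closed-form value at index 0 is the input itself
theorem pv_base (cur : Int) : -(PySem.Int.floordiv (-cur) ((2:Int)^(0:Nat))) = cur := by
  simp

-- distil = false: the loop just replicates the current value
theorem pv_loop_false (e : Int) : ∀ (n : Nat) (idx cur : Int) (acc : List Int),
    pooled_lengths_loopA e false n idx acc cur = acc ++ List.replicate n cur := by
  intro n
  induction n with
  | zero => intro idx cur acc; simp [pooled_lengths_loopA]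
  | succ k ih =>
      intro idx cur acc
      simp only [pooled_lengths_loopA, Bool.false_and, Bool.false_eq_true, if_false]
      rw [ih]
      simp [List.replicate_succ]

-- distil = true: as long as idx + n ≤ e, the loop produces the closed form
theorem pv_loop_true (e : Int) : ∀ (n : Nat) (idx cur : Int) (acc : List Int),
    idx + n ≤ e →
    pooled_lengths_loopA e true n idx acc cur
      = acc ++ (List.range n).map (fun i => -(PySem.Int.floordiv (-cur) ((2:Int)^i))) := by
  intro n
  induction n with
  | zero => intro idx cur acc _; simp [pooled_lengths_loopA]
  | succ k ih =>
      intro idx cur acc h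
      simp only [pooled_lengths_loopA, Bool.true_and]
      cases k with
      | zero =>
          -- single remaining step: whatever current becomes, it is discarded
          simp [pooled_lengths_loopA, List.range_succ]
      | succ m =>
          have hc : idx < e - 1 := by
            have hcast : ((m + 1 + 1 : Nat) : Int) = (m : Int) + 2 := by push_cast; ring
            rw [hcast] at h; omega
          rw [if_pos (by simpa using hc)]
          rw [ih (idx + 1) _ _ (by push_cast at h ⊢; omega)]
          rw [List.range_succ_eq_map (n := m + 1), List.map_cons, List.map_map,
              List.append_assoc]
          congr 1
          rw [List.singleton_append]
          congr 1
          · exact (pv_base cur).symm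
          · refine List.map_congr_left (fun i _ => ?_)
            simpa [Function.comp] using pv_shift cur i

-- ===== VERDICT (by name: the statement is the Claim_ definition above) =====
theorem pooled_lengths_spec : Claim_equal_pooled_lengths := by
  intro length e_layers distil _
  unfold Spec_pooled_lengths pooled_lengths pooled_lengths_alt
  cases distil with
  | false => simpa using pv_loop_false e_layers e_layers.toNat 0 length []
  | true =>
      rw [Bool.not_true, if_neg (by simp)]
      by_cases he : 0 ≤ e_layers
      · exact pv_loop_true e_layers e_layers.toNat 0 length [] (by omega)
      · have h0 : e_layers.toNat = 0 := by omega
        simp [h0, pooled_lengths_loopA]
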